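-- pv_equiv track=rewrite | github.com/pypi-data/pypi-mirror-400 | packages/bitfount/bitfount-11.0.0.tar.gz/bitfount-11.0.0/bitfount/utils/__init__.py | _check_dicts_in_list_have_same_keys
-- ===== SOURCE A (Python) =====
-- from collections.abc import Callable, Generator, Iterable, Mapping
-- from typing import (
--     Any,
--     Hashable,
--     Literal,
--     NoReturn,
--     Optional,
--     TypeVar,
--     Union,
--     cast,
--     get_type_hints as typing_get_type_hints,
-- )
--
-- KT = TypeVar("KT")  # Key type.
--
-- def _check_dicts_in_list_have_same_keys(lod: Iterable[Mapping[KT, Any]]) -> bool: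
--     """Check that all dicts in a list of dicts have the exact same keys.
--
--     Args:
--         lod: The list of dicts to check the keys of.
--
--     Returns:
--         True iff all dicts in the list have the same keys, False otherwise.
--     """
--     baseline_keys: set[KT] = set()
--     for i, d in enumerate(lod):
--         # If this is the first dict, use it to set the baseline keys
--         if i == 0:
--             baseline_keys = set(d.keys())
--         # Otherwise, compare them
--         else:
--             if set(d.keys()) != baseline_keys:
--                 return False
--
--     # If we get to this point, all of the dicts must have had the same keys
--     return True
-- ===== SOURCE B (Python) =====
-- def _check_dicts_in_list_have_same_keys(lod):
--     """True iff all dicts in lod have the same keys.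
--
--     Collects each dict's key signature (sorted key tuple) into a set and
--     checks that at most one distinct signature was seen.
--     """
--     return len({tuple(sorted(d.keys())) for d in lod}) <= 1
-- ===== Notes on version B (the rewrite author's own statement) =====
-- stated objective: simpler
-- what changed: Replaces the baseline-and-compare loop with index branch and early exit by a one-line collect-distinct-signatures-then-count: build the set of sorted-key-tuple signatures and check its cardinality is at most 1.
import Mathlib
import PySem

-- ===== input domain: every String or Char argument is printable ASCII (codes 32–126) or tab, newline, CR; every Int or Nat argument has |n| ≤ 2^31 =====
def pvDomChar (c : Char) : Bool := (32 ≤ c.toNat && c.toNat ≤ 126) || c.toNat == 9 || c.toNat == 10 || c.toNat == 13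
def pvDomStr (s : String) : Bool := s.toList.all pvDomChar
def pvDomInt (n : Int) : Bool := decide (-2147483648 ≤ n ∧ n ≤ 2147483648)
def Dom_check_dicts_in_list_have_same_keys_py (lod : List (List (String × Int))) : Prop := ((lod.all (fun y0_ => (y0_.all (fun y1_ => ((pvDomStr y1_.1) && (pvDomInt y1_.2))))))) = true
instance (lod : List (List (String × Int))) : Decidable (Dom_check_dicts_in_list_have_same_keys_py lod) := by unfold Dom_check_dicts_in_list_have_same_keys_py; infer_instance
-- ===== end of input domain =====

-- B replaces A's baseline-and-compare loop (with index branch and early exit) by collecting each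
-- dict's sorted-key signature into a set and checking its cardinality is at most 1 (simpler).


-- ===== PORT A =====
-- set(d.keys()) for an association-list dict d
def pvKeySet (d : List (String × Int)) : PySem.Set String :=
  PySem.Set.ofList (d.map Prod.fst)

-- the 'else' arm of A's loop: compare each remaining dict's key set against the baseline,
-- returning False at the first mismatch
def pvGoA (baseline : PySem.Set String) (rest : List (List (String × Int))) : Bool :=
  match rest with
  | [] => true
  | d :: t => if PySem.Set.equal (pvKeySet d) baseline then pvGoA baseline t else false

-- the i == 0 branch fixes the baseline from the first dict; an empty list returns True
def check_dicts_in_list_have_same_keys_py (lod : List (List (String × Int))) : Bool :=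
  match lod with
  | [] => true
  | d :: t => pvGoA (pvKeySet d) t

-- ===== PORT B =====
-- tuple(sorted(d.keys()))
def pvSig (d : List (String × Int)) : List String :=
  PySem.List.sorted (d.map Prod.fst) (fun x => x) false

def check_dicts_in_list_have_same_keys_py_alt (lod : List (List (String × Int))) : Bool :=
  decide (PySem.Set.len (PySem.Set.ofList (lod.map pvSig)) ≤ 1)

-- ===== PRECONDITION & SPEC =====
-- Pre_ excludes association lists containing a dict with duplicate keys: such a list does not
-- represent any Python value of the declared type (a Python dict cannot have duplicate keys).
def Pre_check_dicts_in_list_have_same_keys_py (lod : List (List (String × Int))) : Prop :=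
  ∀ d ∈ lod, (d.map Prod.fst).Nodup
instance (lod : List (List (String × Int))) : Decidable (Pre_check_dicts_in_list_have_same_keys_py lod) := by unfold Pre_check_dicts_in_list_have_same_keys_py; infer_instance

def pvWitness_check_dicts_in_list_have_same_keys_py : (List (List (String × Int))) :=
  [[("a", 1), ("b", 2)], [("b", 5), ("a", 0)]]

def Spec_check_dicts_in_list_have_same_keys_py (lod : List (List (String × Int))) (out : Bool) : Prop := out = check_dicts_in_list_have_same_keys_py_alt lod
instance (lod : List (List (String × Int))) (out : Bool) : Decidable (Spec_check_dicts_in_list_have_same_keys_py lod out) := by unfold Spec_check_dicts_in_list_have_same_keys_py; infer_instance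

-- ===== CLAIM (what is proved, stated in full; the proofs are below) =====
def Claim_equal_check_dicts_in_list_have_same_keys_py : Prop := ∀ (lod : List (List (String × Int))), Dom_check_dicts_in_list_have_same_keys_py lod → Pre_check_dicts_in_list_have_same_keys_py lod → Spec_check_dicts_in_list_have_same_keys_py lod (check_dicts_in_list_have_same_keys_py lod)

-- ===== LEMMAS AND PROOFS =====

-- key sets (as sets) are equal iff the sorted key lists are equal, for duplicate-free key lists
theorem pvKeySet_equal_iff_sig_eq (d1 d2 : List (String × Int))
    (h1 : (d1.map Prod.fst).Nodup) (h2 : (d2.map Prod.fst).Nodup) :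
    PySem.Set.equal (pvKeySet d1) (pvKeySet d2) = true ↔ pvSig d1 = pvSig d2 := by
  unfold pvKeySet pvSig
  rw [PySem.Set.equal_iff, PySem.List.sorted_id_eq_sorted_id_iff_perm]
  constructor
  · intro h
    exact (List.perm_ext_iff_of_nodup h1 h2).mpr (fun x => by
      have := h x; simpa [PySem.Set.mem_ofList] using this)
  · intro h x
    simp [PySem.Set.mem_ofList, h.mem_iff]

-- a nodup list whose elements are all a has length ≤ 1
theorem pvNodupConstLen {α : Type} (s : List α) (a : α) (hnd : s.Nodup)
    (h : ∀ x ∈ s, x = a) : s.length ≤ 1 := by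
  match s with
  | [] => simp
  | b :: rest =>
    have hb : b = a := h b (by simp)
    have : rest = [] := by
      cases rest with
      | nil => rfl
      | cons c rc =>
        have hc : c = a := h c (by simp)
        have hnotin : b ∉ c :: rc := by
          have := List.nodup_cons.mp hnd
          exact this.1
        exact absurd (by simp [hb, hc] : b ∈ c :: rc) hnotin
    simp [this]

theorem pvOfListConsLen {α : Type} [BEq α] [LawfulBEq α] (a : α) (l : List α) :
    (PySem.Set.ofList (a :: l)).length ≤ 1 ↔ ∀ x ∈ l, x = a := by
  constructor
  · intro h x hx
    have ha : a ∈ PySem.Set.ofList (a :: l) := (PySem.Set.mem_ofList _ _).mpr (by simp)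
    have hxm : x ∈ PySem.Set.ofList (a :: l) := (PySem.Set.mem_ofList _ _).mpr (by simp [hx])
    match hs : PySem.Set.ofList (a :: l), h with
    | [b], _ =>
      rw [hs] at ha hxm
      simp at ha hxm
      rw [hxm, ha]
    | [], _ => rw [hs] at ha; simp at ha
  · intro h
    exact pvNodupConstLen _ a (PySem.Set.nodup_ofList _)
      (fun x hx => by
        have := (PySem.Set.mem_ofList _ _).mp hx
        rcases List.mem_cons.mp this with h' | h'
        · exact h'
        · exact h x h')

-- A's comparison loop succeeds iff every remaining signature equals the baseline's
theorem pvGoA_iff (d : List (String × Int)) (t : List (List (String × Int)))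
    (hd : (d.map Prod.fst).Nodup) (ht : ∀ d' ∈ t, (d'.map Prod.fst).Nodup) :
    pvGoA (pvKeySet d) t = true ↔ ∀ d' ∈ t, pvSig d' = pvSig d := by
  induction t with
  | nil => simp [pvGoA]
  | cons d' t ih =>
    have hd' := ht d' (by simp)
    have ih' := ih (fun x hx => ht x (by simp [hx]))
    simp only [pvGoA]
    split_ifs with hc
    · rw [ih']
      constructor
      · intro h x hx
        rcases List.mem_cons.mp hx with hx | hx
        · exact hx ▸ (pvKeySet_equal_iff_sig_eq d' d hd' hd).mp hc
        · exact h x hx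
      · intro h x hx; exact h x (by simp [hx])
    · constructor
      · intro h; exact absurd h (by simp)
      · intro h
        exact absurd ((pvKeySet_equal_iff_sig_eq d' d hd' hd).mpr (h d' (by simp))) (by simp [hc])

-- ===== VERDICT (by name: the statement is the Claim_ definition above) =====
theorem check_dicts_in_list_have_same_keys_py_spec : Claim_equal_check_dicts_in_list_have_same_keys_py := by
  intro lod _ hpre
  unfold Spec_check_dicts_in_list_have_same_keys_py
  unfold check_dicts_in_list_have_same_keys_py check_dicts_in_list_have_same_keys_py_alt
  match lod with
  | [] => simp [PySem.Set.ofList, PySem.Set.len]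
  | d :: t =>
    have hd := hpre d (by simp)
    have ht : ∀ d' ∈ t, (d'.map Prod.fst).Nodup := fun x hx => hpre x (by simp [hx])
    have hlen : PySem.Set.len (PySem.Set.ofList ((d :: t).map pvSig)) ≤ 1 ↔
        (PySem.Set.ofList (pvSig d :: t.map pvSig)).length ≤ 1 := by
      simp only [PySem.Set.len, List.map_cons]
      omega
    rw [Bool.eq_iff_iff, decide_eq_true_iff, hlen, pvOfListConsLen, pvGoA_iff d t hd ht]
    constructor
    · intro h x hx
      rcases List.mem_map.mp hx with ⟨d', hd', rfl⟩
      exact h d' hd'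
    · intro h d' hd'
      exact h (pvSig d') (List.mem_map.mpr ⟨d', hd', rfl⟩)
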